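-- pv_equiv track=rewrite | github.com/harshraj220/Research2Presentation | paper2ppt_cli.py | enhance_bullet_flow
-- ===== SOURCE A (Python) =====
-- from typing import List
-- from typing import List
--
-- def enhance_bullet_flow(bullets: List[str]) -> List[str]:
--     """
--     Simple ordering only. Never removes bullets.
--     """
--     raw = [b[2:] if b.startswith("* ") else b for b in bullets]
--
--     priority = {
--         "problem": 0,
--         "challenge": 0,
--         "approach": 1,
--         "method": 1,
--         "model": 1,
--         "result": 2,
--         "performance": 2,
--         "conclusion": 3
--     }
--
--     def score(t: str) -> int:
--         tl = t.lower()
--         for k, v in priority.items():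
--             if k in tl:
--                 return v
--         return 1
--
--     raw.sort(key=score)
--     return [f"* {b}" for b in raw]
-- ===== SOURCE B (Python) =====
-- def enhance_bullet_flow(bullets):
--     keywords = [
--         ("problem", 0), ("challenge", 0),
--         ("approach", 1), ("method", 1), ("model", 1),
--         ("result", 2), ("performance", 2),
--         ("conclusion", 3),
--     ]
--
--     def score(t):
--         tl = t.lower()
--         return next((v for k, v in keywords if k in tl), 1)
--
--     stripped = [b[2:] if b.startswith("* ") else b for b in bullets]
--     # staged passes: one stable filter pass per priority level 0..3, concatenated
--     return ["* " + s for v in range(4) for s in stripped if score(s) == v]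
-- ===== Notes on version B (the rewrite author's own statement) =====
-- stated objective: alternative
-- what changed: Replaces the comparison-based stable sort (sort with key=score) by four stable filter passes, one per fixed priority level 0..3, concatenated in order; the score helper becomes a first-match lookup over a keyword list via next() instead of an explicit dict loop.
import Mathlib
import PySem

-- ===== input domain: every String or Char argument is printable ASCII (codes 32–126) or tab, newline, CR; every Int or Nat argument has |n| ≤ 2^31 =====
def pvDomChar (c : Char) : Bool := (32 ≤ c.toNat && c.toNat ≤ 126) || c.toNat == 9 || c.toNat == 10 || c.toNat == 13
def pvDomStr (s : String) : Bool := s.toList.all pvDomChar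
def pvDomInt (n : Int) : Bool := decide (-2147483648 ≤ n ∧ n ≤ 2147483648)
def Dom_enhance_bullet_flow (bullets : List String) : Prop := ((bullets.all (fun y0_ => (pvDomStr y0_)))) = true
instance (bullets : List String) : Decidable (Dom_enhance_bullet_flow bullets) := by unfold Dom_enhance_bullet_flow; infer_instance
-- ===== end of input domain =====

-- B replaces the stable sort with key=score by four stable filter passes (one per fixed
-- priority level 0..3) and a first-match next()-lookup score; alternative algorithm, similar cost.


-- ===== PORT A =====
-- the priority dict of A, as an insertion-ordered association list
def pvPriority : List (String × Int) :=
  [("problem", 0), ("challenge", 0), ("approach", 1), ("method", 1),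
   ("model", 1), ("result", 2), ("performance", 2), ("conclusion", 3)]

-- A's inner `score`: loop over the dict items, first matching keyword wins, else 1
def pvFindScore (tl : String) : List (String × Int) → Int
  | [] => 1
  | (k, v) :: rest => if PySem.Str.isIn k tl then v else pvFindScore tl rest

def pvScore (t : String) : Int := pvFindScore (PySem.Str.lower t) pvPriority

-- prefix strip: b[2:] if b.startswith("* ") else b
def pvStrip (b : String) : String :=
  if PySem.Str.startswith b "* " then PySem.Str.slice b (some 2) none else b

def enhance_bullet_flow (bullets : List String) : List String :=
  let raw := bullets.map pvStrip
  let sortedRaw := PySem.List.sorted raw pvScore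
  sortedRaw.map (fun b => "* " ++ b)

-- ===== PORT B =====
-- B's keyword table (a plain list of pairs)
def altKeywords : List (String × Int) :=
  [("problem", 0), ("challenge", 0), ("approach", 1), ("method", 1),
   ("model", 1), ("result", 2), ("performance", 2), ("conclusion", 3)]

-- B's score: next((v for k, v in keywords if k in tl), 1) — first-match lookup, default 1
def altScore (t : String) : Int :=
  ((altKeywords.find? (fun kv => PySem.Str.isIn kv.1 (PySem.Str.lower t))).map Prod.snd).getD 1

-- staged passes: for each level v in range(4), keep the stripped bullets scoring v
def enhance_bullet_flow_alt (bullets : List String) : List String :=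
  let stripped := bullets.map (fun b =>
    if PySem.Str.startswith b "* " then PySem.Str.slice b (some 2) none else b)
  (PySem.List.pyRange 0 4 1).flatMap (fun v =>
    (stripped.filter (fun s => altScore s == v)).map (fun s => "* " ++ s))

-- ===== PRECONDITION & SPEC =====
def Spec_enhance_bullet_flow (bullets : List String) (out : List String) : Prop := out = enhance_bullet_flow_alt bullets
instance (bullets : List String) (out : List String) : Decidable (Spec_enhance_bullet_flow bullets out) := by unfold Spec_enhance_bullet_flow; infer_instance

-- ===== CLAIM (what is proved, stated in full; the proofs are below) =====
def Claim_equal_enhance_bullet_flow : Prop := ∀ (bullets : List String), Dom_enhance_bullet_flow bullets → Spec_enhance_bullet_flow bullets (enhance_bullet_flow bullets)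

-- ===== LEMMAS AND PROOFS =====

theorem altScore_eq_pvScore (t : String) : altScore t = pvScore t := by
  unfold altScore pvScore altKeywords pvPriority
  generalize PySem.Str.lower t = tl
  generalize [("problem", (0:Int)), ("challenge", 0), ("approach", 1), ("method", 1),
    ("model", 1), ("result", 2), ("performance", 2), ("conclusion", 3)] = l
  induction l with
  | nil => simp [pvFindScore]
  | cons kv rest ih =>
    obtain ⟨k, v⟩ := kv
    simp only [PySem.Str.isIn_eq] at ih
    by_cases h : PySem.Chars.isIn k.toList tl.toList <;>
      simp [pvFindScore, List.find?, h, ih]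

theorem pvScore_cases (t : String) :
    pvScore t = 0 ∨ pvScore t = 1 ∨ pvScore t = 2 ∨ pvScore t = 3 := by
  unfold pvScore pvPriority
  simp only [pvFindScore]
  split_ifs <;> simp

-- filters of xs by score value, concatenated in score order
def pvBlocks (xs : List String) : List String :=
  xs.filter (fun y => decide (pvScore y = 0)) ++ xs.filter (fun y => decide (pvScore y = 1)) ++
  xs.filter (fun y => decide (pvScore y = 2)) ++ xs.filter (fun y => decide (pvScore y = 3))

theorem insertBy_split {α : Type} (p : α → α → Bool) (x : α) (ys zs : List α)
    (h1 : ∀ y ∈ ys, p x y = false) (h2 : ∀ z ∈ zs, p x z = true) :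
    PySem.List.insertBy p x (ys ++ zs) = ys ++ x :: zs := by
  induction ys with
  | nil =>
    cases zs with
    | nil => simp [PySem.List.insertBy]
    | cons z zs => simp [PySem.List.insertBy, h2 z (by simp)]
  | cons y ys ih =>
    have hy : p x y = false := h1 y (by simp)
    simp only [List.cons_append, PySem.List.insertBy, hy]
    simp only [Bool.false_eq_true, if_false]
    rw [ih (fun y hy => h1 y (by simp [hy]))]

theorem foldl_insertBy_blocks (xs : List String) :
    ∀ (A B C D : List String),
      (∀ y ∈ A, pvScore y = 0) → (∀ y ∈ B, pvScore y = 1) →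
      (∀ y ∈ C, pvScore y = 2) → (∀ y ∈ D, pvScore y = 3) →
      xs.foldl (fun acc x => PySem.List.insertBy (fun a b => decide (pvScore a < pvScore b)) x acc)
        (A ++ B ++ C ++ D) =
      (A ++ xs.filter (fun y => decide (pvScore y = 0))) ++
      (B ++ xs.filter (fun y => decide (pvScore y = 1))) ++
      (C ++ xs.filter (fun y => decide (pvScore y = 2))) ++
      (D ++ xs.filter (fun y => decide (pvScore y = 3))) := by
  induction xs with
  | nil => intro A B C D _ _ _ _; simp
  | cons x xs ih =>
    intro A B C D hA hB hC hD
    simp only [List.foldl_cons]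
    rcases pvScore_cases x with h | h | h | h
    · rw [show A ++ B ++ C ++ D = A ++ (B ++ C ++ D) by simp,
        insertBy_split _ x A (B ++ C ++ D)
          (by intro y hy; simp [hA y hy, h])
          (by intro z hz; simp only [List.mem_append] at hz
              rcases hz with (hz | hz) | hz
              · simp [hB z hz, h]
              · simp [hC z hz, h]
              · simp [hD z hz, h]),
        show A ++ x :: (B ++ C ++ D) = (A ++ [x]) ++ B ++ C ++ D by simp]
      rw [ih (A ++ [x]) B C D
          (by intro y hy; rcases List.mem_append.1 hy with hy | hy
              · exact hA y hy
              · simp at hy; simpa [hy] using h) hB hC hD]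
      simp [h]
    · rw [show A ++ B ++ C ++ D = (A ++ B) ++ (C ++ D) by simp,
        insertBy_split _ x (A ++ B) (C ++ D)
          (by intro y hy; rcases List.mem_append.1 hy with hy | hy
              · simp [hA y hy, h]
              · simp [hB y hy, h])
          (by intro z hz; rcases List.mem_append.1 hz with hz | hz
              · simp [hC z hz, h]
              · simp [hD z hz, h]),
        show (A ++ B) ++ x :: (C ++ D) = A ++ (B ++ [x]) ++ C ++ D by simp]
      rw [ih A (B ++ [x]) C D hA
          (by intro y hy; rcases List.mem_append.1 hy with hy | hy
              · exact hB y hy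
              · simp at hy; simpa [hy] using h) hC hD]
      simp [h]
    · rw [show A ++ B ++ C ++ D = (A ++ B ++ C) ++ D by simp,
        insertBy_split _ x (A ++ B ++ C) D
          (by intro y hy; simp only [List.mem_append] at hy
              rcases hy with (hy | hy) | hy
              · simp [hA y hy, h]
              · simp [hB y hy, h]
              · simp [hC y hy, h])
          (by intro z hz; simp [hD z hz, h]),
        show (A ++ B ++ C) ++ x :: D = A ++ B ++ (C ++ [x]) ++ D by simp]
      rw [ih A B (C ++ [x]) D hA hB
          (by intro y hy; rcases List.mem_append.1 hy with hy | hy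
              · exact hC y hy
              · simp at hy; simpa [hy] using h) hD]
      simp [h]
    · rw [show A ++ B ++ C ++ D = (A ++ B ++ C ++ D) ++ [] by simp,
        insertBy_split _ x (A ++ B ++ C ++ D) []
          (by intro y hy; simp only [List.mem_append] at hy
              rcases hy with ((hy | hy) | hy) | hy
              · simp [hA y hy, h]
              · simp [hB y hy, h]
              · simp [hC y hy, h]
              · simp [hD y hy, h])
          (by intro z hz; simp at hz)]
      rw [show (A ++ B ++ C ++ D) ++ [x] = A ++ B ++ C ++ (D ++ [x]) by simp,
        ih A B C (D ++ [x]) hA hB hC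
          (by intro y hy; rcases List.mem_append.1 hy with hy | hy
              · exact hD y hy
              · simp at hy; simpa [hy] using h)]
      simp [h]

theorem sorted_eq_blocks (xs : List String) :
    PySem.List.sorted xs pvScore = pvBlocks xs := by
  rw [PySem.List.sorted_eq_foldl_insertBy]
  have := foldl_insertBy_blocks xs [] [] [] []
    (by simp) (by simp) (by simp) (by simp)
  simpa [pvBlocks] using this

theorem pyRange_zero_four : PySem.List.pyRange 0 4 1 = [0, 1, 2, 3] := by decide

theorem enhance_bullet_flow_eq (bullets : List String) :
    enhance_bullet_flow bullets = enhance_bullet_flow_alt bullets := by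
  have hstrip : (bullets.map (fun b =>
      if PySem.Str.startswith b "* " then PySem.Str.slice b (some 2) none else b)) =
      bullets.map pvStrip := by simp [pvStrip]
  show (PySem.List.sorted (bullets.map pvStrip) pvScore).map (fun b => "* " ++ b) =
    (PySem.List.pyRange 0 4 1).flatMap (fun v =>
      ((bullets.map (fun b =>
        if PySem.Str.startswith b "* " then PySem.Str.slice b (some 2) none else b)).filter
          (fun s => altScore s == v)).map (fun s => "* " ++ s))
  rw [hstrip, sorted_eq_blocks, pyRange_zero_four]
  have hb : ∀ (v : Int), (fun s => pvScore s == v) = (fun s => decide (pvScore s = v)) := by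
    intro v; funext s; rw [Bool.eq_iff_iff]; simp
  simp [pvBlocks, altScore_eq_pvScore, List.flatMap, hb]

-- ===== VERDICT (by name: the statement is the Claim_ definition above) =====
theorem enhance_bullet_flow_spec : Claim_equal_enhance_bullet_flow := by
  intro bullets _
  unfold Spec_enhance_bullet_flow
  exact enhance_bullet_flow_eq bullets
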